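-- pv_equiv track=rewrite | github.com/chrisbubernak/ProjectEulerChallenges | 63_PowerfulDigitCounts.py | solve
-- ===== SOURCE A (Python) =====
-- def solve(n):
--   finds = 0
--   for i in range(1, n):
--     for j in range(1, n):
--       power = i ** j
--       if len(str(power)) == j:
--         finds = finds + 1
--   return finds
-- ===== SOURCE B (Python) =====
-- def solve(n):
--   # Only single-digit bases can have i**j with exactly j digits, and for each
--   # such base the valid exponents form a prefix whose length the table below gives; so the answer is a closed-form clipped sum.
--   m = max(n - 1, 0)
--   return sum(min(m, t) for t in [1, 1, 1, 2, 3, 4, 6, 10, 21][:m])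
-- ===== Notes on version B (the rewrite author's own statement) =====
-- stated objective: faster
-- what changed: A tests len(str(i**j))==j for all n^2 pairs with huge big-int powers; B uses the facts that only single-digit bases can ever have i**j with exactly j digits and that for each such base the valid exponents form a fixed prefix, reducing the answer to a clipped sum over a small fixed table.
import Mathlib
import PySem

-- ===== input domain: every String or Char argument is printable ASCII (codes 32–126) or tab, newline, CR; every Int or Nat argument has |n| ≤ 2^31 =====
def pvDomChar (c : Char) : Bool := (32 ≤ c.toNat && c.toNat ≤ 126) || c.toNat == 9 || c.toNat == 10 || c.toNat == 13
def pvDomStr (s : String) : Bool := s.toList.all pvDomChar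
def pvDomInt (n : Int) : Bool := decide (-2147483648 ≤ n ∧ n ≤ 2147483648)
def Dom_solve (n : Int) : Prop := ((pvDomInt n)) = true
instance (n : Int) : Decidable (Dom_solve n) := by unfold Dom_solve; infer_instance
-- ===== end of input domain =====

-- B replaces A's O(n^2) big-integer double loop by a clipped sum over the few single-digit bases
-- that can contribute (faster: asymptotic).

-- ===== PORT A =====
def solve (n : Int) : Int :=
  (PySem.List.pyRange 1 n).foldl (fun finds i =>
    (PySem.List.pyRange 1 n).foldl (fun finds j =>
      -- power = i ** j ; j ≥ 1 inside the loop, so Int exponentiation by j.toNat is exact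
      let power : Int := i ^ j.toNat
      if PySem.Str.len (PySem.Int.toStr power) = j then finds + 1 else finds) finds) 0

-- ===== PORT B =====
def solve_alt (n : Int) : Int :=
  let m : Int := max (n - 1) 0
  ((PySem.List.slice [1, 1, 1, 2, 3, 4, 6, 10, 21] none (some m)).map (fun t => min m t)).sum

-- ===== PRECONDITION & SPEC =====
def Spec_solve (n : Int) (out : Int) : Prop := out = solve_alt n
instance (n : Int) (out : Int) : Decidable (Spec_solve n out) := by unfold Spec_solve; infer_instance

-- ===== CLAIM (what is proved, stated in full; the proofs are below) =====
def Claim_equal_solve : Prop := ∀ (n : Int), Dom_solve n → Spec_solve n (solve n)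

-- ===== LEMMAS AND PROOFS =====

-- proof-only helper: the largest exponent j with len(str(i**j)) == j, per single-digit base
def pvT (i : Int) : Int :=
  if i = 1 then 1 else if i = 2 then 1 else if i = 3 then 1 else if i = 4 then 2
  else if i = 5 then 3 else if i = 6 then 4 else if i = 7 then 6 else if i = 8 then 10
  else if i = 9 then 21 else 0

-- lower bound on the length of Nat.toDigitsCore (Mathlib only carries the upper bound)
lemma pvToDigitsCore_lb : ∀ (f n e : Nat) (l : List Char), n < f → 10 ^ e ≤ n →
    e + l.length < (Nat.toDigitsCore 10 f n l).length := by
  intro f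
  induction f with
  | zero => intro n e l h; omega
  | succ f ih =>
    intro n e l hf he
    rw [Nat.toDigitsCore]
    by_cases h0 : n / 10 = 0
    · simp only [h0]
      have hn : n < 10 := by omega
      have he0 : e = 0 := by
        by_contra hc
        have : 10 ^ 1 ≤ 10 ^ e := Nat.pow_le_pow_right (by norm_num) (by omega)
        simp at this; omega
      simp [he0]
    · simp only [if_neg h0]
      have hn10 : 10 ≤ n := by
        by_contra hc
        exact h0 (Nat.div_eq_of_lt (by omega))
      have hdiv : n / 10 < f := by
        have := Nat.div_lt_self (by omega : 0 < n) (by norm_num : 1 < 10)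
        omega
      cases e with
      | zero =>
        have := ih (n / 10) 0 ((n % 10).digitChar :: l) hdiv (by
          have : 1 ≤ n / 10 := Nat.one_le_div_iff (by norm_num) |>.mpr hn10
          simpa using this)
        simp at this ⊢; omega
      | succ e =>
        have he' : 10 ^ e ≤ n / 10 := by
          rw [Nat.le_div_iff_mul_le (by norm_num)]
          calc 10 ^ e * 10 = 10 ^ (e + 1) := by rw [pow_succ]
            _ ≤ n := he
        have := ih (n / 10) e ((n % 10).digitChar :: l) hdiv he'
        simp at this ⊢; omega

lemma pvDlen_gt (n e : Nat) (h : 10 ^ e ≤ n) : e < (Nat.toDigits 10 n).length := by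
  have := pvToDigitsCore_lb (n + 1) n e [] (by omega) h
  simpa [Nat.toDigits] using this

lemma pvDlenEq (n e : Nat) (hlo : 10 ^ e ≤ n) (hhi : n < 10 ^ (e + 1)) :
    (Nat.toDigits 10 n).length = e + 1 :=
  le_antisymm (Nat.toDigits_length 10 n (e + 1) (by omega) hhi) (pvDlen_gt n e hlo)

lemma pvPowSmall (a J : Nat) (ha : a < 10) (hJ : 1 ≤ J) (hbase : a ^ J < 10 ^ (J - 1)) :
    ∀ b, J ≤ b → a ^ b < 10 ^ (b - 1) := by
  intro b hb
  induction b, hb using Nat.le_induction with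
  | base => exact hbase
  | succ b hb ih =>
    have h1 : 1 ≤ b := le_trans hJ hb
    calc a ^ (b + 1) = a ^ b * a := by ring
      _ < 10 ^ (b - 1) * 10 := Nat.mul_lt_mul_of_lt_of_le ih (le_of_lt ha) (by positivity)
      _ = 10 ^ b := by rw [← pow_succ]; congr 1; omega
      _ = 10 ^ (b + 1 - 1) := by congr 1

lemma pvCase (a t : Nat) (ht : 1 ≤ t) (ha10 : a < 10)
    (hup : ∀ b, 1 ≤ b → b ≤ t → 10 ^ (b - 1) ≤ a ^ b ∧ a ^ b < 10 ^ b)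
    (hover : a ^ (t + 1) < 10 ^ t) :
    ∀ b, 1 ≤ b → ((Nat.toDigits 10 (a ^ b)).length = b ↔ b ≤ t) := by
  intro b hb
  by_cases hbt : b ≤ t
  · obtain ⟨hlo, hhi⟩ := hup b hb hbt
    have := pvDlenEq (a ^ b) (b - 1) hlo (by simpa [Nat.sub_add_cancel hb] using hhi)
    constructor
    · intro; exact hbt
    · intro; omega
  · have hsm : a ^ b < 10 ^ (b - 1) :=
      pvPowSmall a (t + 1) ha10 (by omega) (by rwa [Nat.add_sub_cancel]) b (by omega)
    have hle : (Nat.toDigits 10 (a ^ b)).length ≤ b - 1 :=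
      Nat.toDigits_length 10 (a ^ b) (b - 1) (by omega) hsm
    constructor
    · intro h; omega
    · intro h; omega

lemma pvCondNat (a b : Nat) (ha : 1 ≤ a) (hb : 1 ≤ b) :
    ((Nat.toDigits 10 (a ^ b)).length = b ↔ (a ≤ 9 ∧ (b : Int) ≤ pvT (a : Int))) := by
  by_cases h9 : a ≤ 9
  · interval_cases a
    · rw [pvCase 1 1 (by norm_num) (by norm_num) (by intro b h1 h2; interval_cases b; norm_num)
        (by norm_num) b hb]
      norm_num [pvT]
    · rw [pvCase 2 1 (by norm_num) (by norm_num) (by intro b h1 h2; interval_cases b; norm_num)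
        (by norm_num) b hb]
      norm_num [pvT]
    · rw [pvCase 3 1 (by norm_num) (by norm_num) (by intro b h1 h2; interval_cases b; norm_num)
        (by norm_num) b hb]
      norm_num [pvT]
    · rw [pvCase 4 2 (by norm_num) (by norm_num) (by intro b h1 h2; interval_cases b <;> norm_num)
        (by norm_num) b hb]
      norm_num [pvT]
    · rw [pvCase 5 3 (by norm_num) (by norm_num) (by intro b h1 h2; interval_cases b <;> norm_num)
        (by norm_num) b hb]
      norm_num [pvT]
    · rw [pvCase 6 4 (by norm_num) (by norm_num) (by intro b h1 h2; interval_cases b <;> norm_num)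
        (by norm_num) b hb]
      norm_num [pvT]
    · rw [pvCase 7 6 (by norm_num) (by norm_num) (by intro b h1 h2; interval_cases b <;> norm_num)
        (by norm_num) b hb]
      norm_num [pvT]
    · rw [pvCase 8 10 (by norm_num) (by norm_num) (by intro b h1 h2; interval_cases b <;> norm_num)
        (by norm_num) b hb]
      norm_num [pvT]
    · rw [pvCase 9 21 (by norm_num) (by norm_num) (by intro b h1 h2; interval_cases b <;> norm_num)
        (by norm_num) b hb]
      norm_num [pvT]
  · have h10 : 10 ^ b ≤ a ^ b := Nat.pow_le_pow_left (by omega) b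
    have := pvDlen_gt (a ^ b) b h10
    constructor
    · intro h; omega
    · intro h; exact absurd h.1 (by omega)

lemma pvCondInt (i j : Int) (hi : 1 ≤ i) (hj : 1 ≤ j) :
    (PySem.Str.len (PySem.Int.toStr (i ^ j.toNat)) = j) ↔ (i ≤ 9 ∧ j ≤ pvT i) := by
  obtain ⟨a, rfl⟩ : ∃ a : Nat, i = (a : Int) := ⟨i.toNat, (Int.toNat_of_nonneg (by omega)).symm⟩
  obtain ⟨b, hjb⟩ : ∃ b : Nat, j = (b : Int) := ⟨j.toNat, (Int.toNat_of_nonneg (by omega)).symm⟩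
  subst hjb
  rw [Int.toNat_natCast]
  have hpow : ((a : Int)) ^ b = ((a ^ b : Nat) : Int) := by push_cast; rfl
  rw [hpow, PySem.Str.len_eq, PySem.Int.toList_toStr]
  have hchars : PySem.Int.toChars ((a ^ b : Nat) : Int) = Nat.toDigits 10 (a ^ b) := by
    unfold PySem.Int.toChars
    rw [if_neg (Int.not_lt.mpr (Int.natCast_nonneg _)), Int.toNat_natCast]
  rw [hchars]
  have ha : 1 ≤ a := by exact_mod_cast hi
  have hb : 1 ≤ b := by exact_mod_cast hj
  rw [show ((Nat.toDigits 10 (a ^ b)).length : Int) = (b : Int) ↔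
      (Nat.toDigits 10 (a ^ b)).length = b from Int.natCast_inj]
  rw [pvCondNat a b ha hb]
  constructor
  · rintro ⟨h1, h2⟩; exact ⟨by exact_mod_cast h1, h2⟩
  · rintro ⟨h1, h2⟩; exact ⟨by exact_mod_cast h1, h2⟩

lemma pvCountRange (m t : Nat) :
    (List.range m).countP (fun k => decide (k < t)) = min m t := by
  induction m with
  | zero => simp
  | succ m ih =>
    rw [List.range_succ, List.countP_append, ih]
    by_cases h : m < t <;> simp [h] <;> omega

-- the inner loop is a count
lemma pvInner0 (n i acc : Int) :
    (PySem.List.pyRange 1 n).foldl (fun finds j =>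
      let power : Int := i ^ j.toNat
      if PySem.Str.len (PySem.Int.toStr power) = j then finds + 1 else finds) acc
    = acc + ((PySem.List.pyRange 1 n).countP
        (fun j => decide (PySem.Str.len (PySem.Int.toStr (i ^ j.toNat)) = j)) : Int) := by
  have hfun : (fun (finds j : Int) =>
      let power : Int := i ^ j.toNat
      if PySem.Str.len (PySem.Int.toStr power) = j then finds + 1 else finds)
      = (fun (finds j : Int) =>
        if (fun j : Int => decide (PySem.Str.len (PySem.Int.toStr (i ^ j.toNat)) = j)) j = true
        then finds + 1 else finds) := by
    funext f j; simp
  rw [hfun, PySem.List.foldl_count_if]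

-- value of the count for the i actually visited by the outer loop
lemma pvInnerVal (n i : Int) (hi : 1 ≤ i) :
    ((PySem.List.pyRange 1 n).countP
        (fun j => decide (PySem.Str.len (PySem.Int.toStr (i ^ j.toNat)) = j)) : Int)
    = (if i ≤ 9 then ((min (n - 1).toNat (pvT i).toNat : Nat) : Int) else 0) := by
  rw [PySem.List.pyRange_one, List.countP_map]
  by_cases h9 : i ≤ 9
  · rw [if_pos h9]
    have hcong : (List.range (n - 1).toNat).countP
        ((fun j => decide (PySem.Str.len (PySem.Int.toStr (i ^ j.toNat)) = j)) ∘
          (fun k : Nat => (1 : Int) + (k : Int)))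
        = (List.range (n - 1).toNat).countP (fun k => decide (k < (pvT i).toNat)) := by
      apply List.countP_congr
      intro k _
      have h1k : (1 : Int) ≤ 1 + (k : Int) := by omega
      have ht1 : 1 ≤ pvT i := by
        have : 1 ≤ i := hi
        unfold pvT; split_ifs <;> omega
      simp only [Function.comp, pvCondInt i (1 + (k : Int)) hi h1k]
      constructor
      · intro h
        have := (of_decide_eq_true h).2
        simp; omega
      · intro h
        have := of_decide_eq_true h
        simp; exact ⟨h9, by omega⟩
    rw [hcong, pvCountRange]
  · rw [if_neg h9]
    have : (List.range (n - 1).toNat).countP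
        ((fun j => decide (PySem.Str.len (PySem.Int.toStr (i ^ j.toNat)) = j)) ∘
          (fun k : Nat => (1 : Int) + (k : Int))) = 0 := by
      rw [List.countP_eq_zero]
      intro k _
      have h1k : (1 : Int) ≤ 1 + (k : Int) := by omega
      simp only [Function.comp, pvCondInt i (1 + (k : Int)) hi h1k]
      simp; intro h; omega
    rw [this]; rfl

-- the common closed form, for r = min m 9
lemma pvFinal (m r : Nat) (hr : r = min m 9) :
    ((List.range r).map (fun (k : Nat) => ((min m (pvT (1 + (k : Int))).toNat : Nat) : Int))).sum
    = ((([1, 1, 1, 2, 3, 4, 6, 10, 21] : List Int).take m).map (fun t => min (m : Int) t)).sum := by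
  by_cases hm : m ≤ 9
  · have hrm : r = m := by omega
    subst hrm
    interval_cases r <;> simp [List.range_succ, pvT]
  · have hr9 : r = 9 := by omega
    subst hr9
    rw [List.take_of_length_le (by simp; omega)]
    simp [List.range_succ, pvT]

-- ===== VERDICT (by name: the statement is the Claim_ definition above) =====
theorem solve_spec : Claim_equal_solve := by
  intro n _
  unfold Spec_solve solve solve_alt
  simp only [pvInner0, PySem.List.foldl_add]
  rw [List.map_congr_left (fun i hi => by
    rw [pvInnerVal n i (by
      have := (PySem.List.mem_pyRange_one.mp hi).1; omega)])]
  have hmax : max (n - 1) 0 = (((n - 1).toNat : Nat) : Int) := by omega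
  rw [hmax, PySem.List.slice_to_natCast]
  set m : Nat := (n - 1).toNat with hm
  by_cases hn : n ≤ 10
  · have hall : ∀ i ∈ PySem.List.pyRange 1 n,
        (if i ≤ 9 then ((min m (pvT i).toNat : Nat) : Int) else 0)
        = ((min m (pvT i).toNat : Nat) : Int) := by
      intro i hi
      have := PySem.List.mem_pyRange_one.mp hi
      rw [if_pos (by omega)]
    rw [List.map_congr_left hall, PySem.List.pyRange_one, List.map_map]
    have hrange : (n - 1).toNat = min m 9 := by omega
    rw [hrange]
    simp only [Function.comp_def, zero_add]
    exact pvFinal m (min m 9) rfl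
  · rw [PySem.List.pyRange_one_append 1 10 n (by omega) (by omega), List.map_append,
      List.sum_append]
    have hzero : ((PySem.List.pyRange 10 n).map
        (fun i => if i ≤ 9 then ((min m (pvT i).toNat : Nat) : Int) else 0)).sum = 0 := by
      apply List.sum_eq_zero
      intro x hx
      simp only [List.mem_map] at hx
      obtain ⟨i, hi, rfl⟩ := hx
      have := PySem.List.mem_pyRange_one.mp hi
      rw [if_neg (by omega)]
    rw [hzero, add_zero]
    have hall : ∀ i ∈ PySem.List.pyRange 1 10,
        (if i ≤ 9 then ((min m (pvT i).toNat : Nat) : Int) else 0)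
        = ((min m (pvT i).toNat : Nat) : Int) := by
      intro i hi
      have := PySem.List.mem_pyRange_one.mp hi
      rw [if_pos (by omega)]
    rw [List.map_congr_left hall, PySem.List.pyRange_one, List.map_map]
    have h9 : ((10 : Int) - 1).toNat = min m 9 := by omega
    rw [h9]
    simp only [Function.comp_def, zero_add]
    exact pvFinal m (min m 9) rfl
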